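-- pv_equiv track=rewrite | github.com/pestopoppa/epyc-orchestrator | scripts/autopilot/config_applicator.py | classify_params
-- ===== SOURCE A (Python) =====
-- from typing import Any
--
-- HOT_SWAP_FEATURES = {
--     "memrl", "tools", "scripts", "streaming", "openai_compat", "repl",
--     "caching", "specialist_routing", "architect_delegation", "session_log",
--     "generation_monitor", "think_harder", "graph_router", "skillbank",
--     "routing_classifier", "staged_rewards", "session_compaction",
--     "try_cheap_first", "long_context", "web_search", "web_research",
--     "cascading_tool_policy", "factual_risk",
-- }
--
-- ENV_PARAMS = {
--     "memrl_retrieval": {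
--         "q_weight": "ORCHESTRATOR_MEMRL_RETRIEVAL_Q_WEIGHT",
--         "min_similarity": "ORCHESTRATOR_MEMRL_RETRIEVAL_MIN_SIMILARITY",
--         "min_q_value": "ORCHESTRATOR_MEMRL_RETRIEVAL_MIN_Q_VALUE",
--         "confidence_threshold": "ORCHESTRATOR_MEMRL_RETRIEVAL_CONFIDENCE_THRESHOLD",
--         "semantic_k": "ORCHESTRATOR_MEMRL_RETRIEVAL_SEMANTIC_K",
--         "prior_strength": "ORCHESTRATOR_MEMRL_RETRIEVAL_PRIOR_STRENGTH",
--     },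
--     "think_harder": {
--         "min_expected_roi": "ORCHESTRATOR_THINK_HARDER_MIN_EXPECTED_ROI",
--         "token_budget_min": "ORCHESTRATOR_THINK_HARDER_TOKEN_BUDGET_MIN",
--         "token_budget_max": "ORCHESTRATOR_THINK_HARDER_TOKEN_BUDGET_MAX",
--         "cot_roi_threshold": "ORCHESTRATOR_THINK_HARDER_COT_ROI_THRESHOLD",
--     },
--     "monitor": {
--         "entropy_threshold": "ORCHESTRATOR_MONITOR_ENTROPY_THRESHOLD",
--         "repetition_threshold": "ORCHESTRATOR_MONITOR_REPETITION_THRESHOLD",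
--         "entropy_spike_threshold": "ORCHESTRATOR_MONITOR_ENTROPY_SPIKE_THRESHOLD",
--     },
--     "chat": {
--         "try_cheap_first_quality_threshold": "ORCHESTRATOR_CHAT_TRY_CHEAP_FIRST_QUALITY_THRESHOLD",
--     },
--     "escalation": {
--         "max_retries": "ORCHESTRATOR_ESCALATION_MAX_RETRIES",
--         "max_escalations": "ORCHESTRATOR_ESCALATION_MAX_ESCALATIONS",
--     },
-- }
--
-- def classify_params(params: dict[str, Any]) -> dict[str, dict[str, Any]]:
--     """Classify parameters by application method.
--
--     Returns {"hot_swap": {...}, "env_restart": {...}, "unknown": {...}}.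
--     """
--     result: dict[str, dict[str, Any]] = {
--         "hot_swap": {},
--         "env_restart": {},
--         "unknown": {},
--     }
--
--     for key, value in params.items():
--         if key in HOT_SWAP_FEATURES:
--             result["hot_swap"][key] = value
--         elif "." in key:
--             section, param = key.split(".", 1)
--             if section in ENV_PARAMS and param in ENV_PARAMS[section]:
--                 result["env_restart"][key] = value
--             else:
--                 result["unknown"][key] = value
--         else:
--             result["unknown"][key] = value
--
--     return result
-- ===== SOURCE B (Python) =====
-- from typing import Any
--
-- HOT_SWAP_FEATURES = {
--     "memrl", "tools", "scripts", "streaming", "openai_compat", "repl",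
--     "caching", "specialist_routing", "architect_delegation", "session_log",
--     "generation_monitor", "think_harder", "graph_router", "skillbank",
--     "routing_classifier", "staged_rewards", "session_compaction",
--     "try_cheap_first", "long_context", "web_search", "web_research",
--     "cascading_tool_policy", "factual_risk",
-- }
--
-- ENV_PARAMS = {
--     "memrl_retrieval": {
--         "q_weight": "ORCHESTRATOR_MEMRL_RETRIEVAL_Q_WEIGHT",
--         "min_similarity": "ORCHESTRATOR_MEMRL_RETRIEVAL_MIN_SIMILARITY",
--         "min_q_value": "ORCHESTRATOR_MEMRL_RETRIEVAL_MIN_Q_VALUE",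
--         "confidence_threshold": "ORCHESTRATOR_MEMRL_RETRIEVAL_CONFIDENCE_THRESHOLD",
--         "semantic_k": "ORCHESTRATOR_MEMRL_RETRIEVAL_SEMANTIC_K",
--         "prior_strength": "ORCHESTRATOR_MEMRL_RETRIEVAL_PRIOR_STRENGTH",
--     },
--     "think_harder": {
--         "min_expected_roi": "ORCHESTRATOR_THINK_HARDER_MIN_EXPECTED_ROI",
--         "token_budget_min": "ORCHESTRATOR_THINK_HARDER_TOKEN_BUDGET_MIN",
--         "token_budget_max": "ORCHESTRATOR_THINK_HARDER_TOKEN_BUDGET_MAX",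
--         "cot_roi_threshold": "ORCHESTRATOR_THINK_HARDER_COT_ROI_THRESHOLD",
--     },
--     "monitor": {
--         "entropy_threshold": "ORCHESTRATOR_MONITOR_ENTROPY_THRESHOLD",
--         "repetition_threshold": "ORCHESTRATOR_MONITOR_REPETITION_THRESHOLD",
--         "entropy_spike_threshold": "ORCHESTRATOR_MONITOR_ENTROPY_SPIKE_THRESHOLD",
--     },
--     "chat": {
--         "try_cheap_first_quality_threshold": "ORCHESTRATOR_CHAT_TRY_CHEAP_FIRST_QUALITY_THRESHOLD",
--     },
--     "escalation": {
--         "max_retries": "ORCHESTRATOR_ESCALATION_MAX_RETRIES",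
--         "max_escalations": "ORCHESTRATOR_ESCALATION_MAX_ESCALATIONS",
--     },
-- }
--
-- # Flat index of all valid env-restart keys, built once: "<section>.<param>".
-- ENV_KEYS = {
--     section + "." + param
--     for section, section_params in ENV_PARAMS.items()
--     for param in section_params
-- }
--
-- BUCKETS = ("hot_swap", "env_restart", "unknown")
--
--
-- def _bucket_of(key: str) -> str:
--     """Total classification function: which bucket a single key belongs to."""
--     if key in HOT_SWAP_FEATURES:
--         return "hot_swap"
--     if key in ENV_KEYS:
--         return "env_restart"
--     return "unknown"
--
--
-- def classify_params(params: dict[str, Any]) -> dict[str, dict[str, Any]]: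
--     """Classify parameters by application method.
--
--     Group-by formulation: each bucket is built by its own filtering pass over
--     params, selecting the keys whose computed label equals that bucket.
--     """
--     return {
--         bucket: {k: v for k, v in params.items() if _bucket_of(k) == bucket}
--         for bucket in BUCKETS
--     }
-- ===== Notes on version B (the rewrite author's own statement) =====
-- stated objective: simpler
-- what changed: Replaces A's single mutating pass (per-key '.'-test, split('.',1), nested two-level ENV_PARAMS lookup, in-place bucket updates) with a group-by formulation: a total _bucket_of label function using a flat precomputed set of 'section.param' keys, and one independent filtering dict comprehension per bucket (three staged passes, no mutable accumulator).
import Mathlib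
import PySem

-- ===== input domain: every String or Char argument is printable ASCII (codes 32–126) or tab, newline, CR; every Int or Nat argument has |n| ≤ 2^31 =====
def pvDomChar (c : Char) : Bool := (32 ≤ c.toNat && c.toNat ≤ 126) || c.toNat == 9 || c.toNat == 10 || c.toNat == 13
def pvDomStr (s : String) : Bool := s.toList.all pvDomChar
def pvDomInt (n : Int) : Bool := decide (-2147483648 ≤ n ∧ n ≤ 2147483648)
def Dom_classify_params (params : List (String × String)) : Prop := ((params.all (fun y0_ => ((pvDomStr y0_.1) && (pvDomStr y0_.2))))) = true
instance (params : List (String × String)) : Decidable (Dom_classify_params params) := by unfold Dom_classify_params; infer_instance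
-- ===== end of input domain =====

-- B replaces A's single mutating pass (split('.',1) + nested ENV_PARAMS lookup, in-place bucket
-- updates) with a group-by formulation: a total bucket-label function over a flat precomputed
-- "section.param" key set, and one independent filtering pass per bucket (simpler; same cost).


-- ===== PORT A =====
-- module constant HOT_SWAP_FEATURES (a Python set)
def pvHotSwap : PySem.Set String := PySem.Set.ofList
  ["memrl", "tools", "scripts", "streaming", "openai_compat", "repl",
   "caching", "specialist_routing", "architect_delegation", "session_log",
   "generation_monitor", "think_harder", "graph_router", "skillbank",
   "routing_classifier", "staged_rewards", "session_compaction",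
   "try_cheap_first", "long_context", "web_search", "web_research",
   "cascading_tool_policy", "factual_risk"]

-- module constant ENV_PARAMS (a dict of dicts)
def pvEnvParams : PySem.Dict String (PySem.Dict String String) := PySem.Dict.ofList
  [("memrl_retrieval", PySem.Dict.ofList
      [("q_weight", "ORCHESTRATOR_MEMRL_RETRIEVAL_Q_WEIGHT"),
       ("min_similarity", "ORCHESTRATOR_MEMRL_RETRIEVAL_MIN_SIMILARITY"),
       ("min_q_value", "ORCHESTRATOR_MEMRL_RETRIEVAL_MIN_Q_VALUE"),
       ("confidence_threshold", "ORCHESTRATOR_MEMRL_RETRIEVAL_CONFIDENCE_THRESHOLD"),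
       ("semantic_k", "ORCHESTRATOR_MEMRL_RETRIEVAL_SEMANTIC_K"),
       ("prior_strength", "ORCHESTRATOR_MEMRL_RETRIEVAL_PRIOR_STRENGTH")]),
   ("think_harder", PySem.Dict.ofList
      [("min_expected_roi", "ORCHESTRATOR_THINK_HARDER_MIN_EXPECTED_ROI"),
       ("token_budget_min", "ORCHESTRATOR_THINK_HARDER_TOKEN_BUDGET_MIN"),
       ("token_budget_max", "ORCHESTRATOR_THINK_HARDER_TOKEN_BUDGET_MAX"),
       ("cot_roi_threshold", "ORCHESTRATOR_THINK_HARDER_COT_ROI_THRESHOLD")]),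
   ("monitor", PySem.Dict.ofList
      [("entropy_threshold", "ORCHESTRATOR_MONITOR_ENTROPY_THRESHOLD"),
       ("repetition_threshold", "ORCHESTRATOR_MONITOR_REPETITION_THRESHOLD"),
       ("entropy_spike_threshold", "ORCHESTRATOR_MONITOR_ENTROPY_SPIKE_THRESHOLD")]),
   ("chat", PySem.Dict.ofList
      [("try_cheap_first_quality_threshold", "ORCHESTRATOR_CHAT_TRY_CHEAP_FIRST_QUALITY_THRESHOLD")]),
   ("escalation", PySem.Dict.ofList
      [("max_retries", "ORCHESTRATOR_ESCALATION_MAX_RETRIES"),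
       ("max_escalations", "ORCHESTRATOR_ESCALATION_MAX_ESCALATIONS")])]

-- the body of A's for-loop: result[bucket][key] = value is Dict.modify bucket (insert key value)
def pvStepA (r : PySem.Dict String (PySem.Dict String String)) (kv : String × String) :
    PySem.Dict String (PySem.Dict String String) :=
  if PySem.Set.contains pvHotSwap kv.1 then
    r.modify "hot_swap" PySem.Dict.empty (fun d => d.insert kv.1 kv.2)
  else if PySem.Str.isIn "." kv.1 then
    -- section, param = key.split(".", 1)  — with "." in key this is exactly two pieces
    match PySem.Str.splitMax? kv.1 "." 1 with
    | some [sec, par] =>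
        if pvEnvParams.contains sec && (pvEnvParams.getD sec PySem.Dict.empty).contains par then
          r.modify "env_restart" PySem.Dict.empty (fun d => d.insert kv.1 kv.2)
        else
          r.modify "unknown" PySem.Dict.empty (fun d => d.insert kv.1 kv.2)
    | _ => r  -- unreachable: split(".", 1) with "." in key always yields two pieces
  else
    r.modify "unknown" PySem.Dict.empty (fun d => d.insert kv.1 kv.2)

def classify_params (params : List (String × String)) : List (String × List (String × String)) :=
  let result : PySem.Dict String (PySem.Dict String String) := PySem.Dict.ofList
    [("hot_swap", PySem.Dict.empty), ("env_restart", PySem.Dict.empty), ("unknown", PySem.Dict.empty)]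
  let result := params.foldl pvStepA result
  result.items.map (fun p => (p.1, p.2.items))

-- ===== PORT B =====
-- module constant ENV_KEYS = { section + "." + param ... } built once from ENV_PARAMS
def pvEnvKeys : PySem.Set String := PySem.Set.ofList
  (pvEnvParams.items.flatMap (fun sp =>
    sp.2.keys.map (fun par => String.ofList (sp.1.toList ++ '.' :: par.toList))))

-- BUCKETS = ("hot_swap", "env_restart", "unknown")
def pvBuckets : List String := ["hot_swap", "env_restart", "unknown"]

-- _bucket_of: total classification function for one key
def pvBucketOf (key : String) : String :=
  if PySem.Set.contains pvHotSwap key then "hot_swap"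
  else if PySem.Set.contains pvEnvKeys key then "env_restart"
  else "unknown"

-- dict comprehension over the keys whose label equals the bucket = fold of inserts over the filter
def classify_params_alt (params : List (String × String)) : List (String × List (String × String)) :=
  pvBuckets.map (fun bucket =>
    (bucket,
      ((params.filter (fun kv => pvBucketOf kv.1 == bucket)).foldl
        (fun d kv => d.insert kv.1 kv.2) (PySem.Dict.empty : PySem.Dict String String)).items))

-- ===== PRECONDITION & SPEC =====
def Spec_classify_params (params : List (String × String)) (out : List (String × List (String × String))) : Prop := out = classify_params_alt params
instance (params : List (String × String)) (out : List (String × List (String × String))) : Decidable (Spec_classify_params params out) := by unfold Spec_classify_params; infer_instance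

-- ===== CLAIM (what is proved, stated in full; the proofs are below) =====
def Claim_equal_classify_params : Prop := ∀ (params : List (String × String)), Dom_classify_params params → Spec_classify_params params (classify_params params)

-- ===== LEMMAS AND PROOFS =====

-- the conditional insert a bucket's filtered fold unfolds to (proof helper)
def pvCond (b : String) (d : PySem.Dict String String) (kv : String × String) :
    PySem.Dict String String :=
  if pvBucketOf kv.1 == b then d.insert kv.1 kv.2 else d

-- splitOnMax.go with maxsplit exhausted returns the remainder as one final piece
theorem pv_go_zero (fuel : Nat) (l cur : List Char) (acc : List (List Char)) :
    PySem.Chars.splitOnMax.go ['.'] fuel 0 l cur acc = ((cur.reverse ++ l) :: acc).reverse := by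
  cases fuel with
  | zero => rw [PySem.Chars.splitOnMax.go]
  | succ f => cases l with
    | nil => rw [PySem.Chars.splitOnMax.go]; simp; omega
    | cons c rest => rw [PySem.Chars.splitOnMax.go]; simp

-- characterisation of split(".", 1) on the char level
theorem pv_go_char : ∀ (cs : List Char) (fuel : Nat) (cur : List Char) (acc : List (List Char)),
    cs.length < fuel →
    PySem.Chars.splitOnMax.go ['.'] fuel 1 cs cur acc =
      if '.' ∈ cs
      then (((cs.dropWhile (· ≠ '.')).tail) :: (cur.reverse ++ cs.takeWhile (· ≠ '.')) :: acc).reverse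
      else ((cur.reverse ++ cs) :: acc).reverse := by
  intro cs
  induction cs with
  | nil =>
    intro fuel cur acc h
    cases fuel with
    | zero => omega
    | succ f => simp [PySem.Chars.splitOnMax.go]
  | cons c rest ih =>
    intro fuel cur acc h
    cases fuel with
    | zero => omega
    | succ f =>
      rw [PySem.Chars.splitOnMax.go]
      by_cases hc : c = '.'
      · subst hc
        have hpre : (['.'] : List Char).isPrefixOf ('.' :: rest) = true := by
          simp [List.isPrefixOf]
        simp only [if_neg (by norm_num : ¬(1 : Nat) = 0), hpre, if_true]
        rw [pv_go_zero]
        simp [List.dropWhile, List.takeWhile]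
      · have hcs : ('.' : Char) ≠ c := Ne.symm hc
        have hpre : (['.'] : List Char).isPrefixOf (c :: rest) = false := by
          simp [List.isPrefixOf, hcs]
        simp only [if_neg (by norm_num : ¬(1 : Nat) = 0), hpre, Bool.false_eq_true, if_false]
        rw [ih f (c :: cur) acc (by simpa using Nat.lt_of_succ_lt_succ h)]
        by_cases hm : '.' ∈ rest
        · have h2 : '.' ∈ c :: rest := List.mem_cons_of_mem _ hm
          simp [hm, h2, List.dropWhile, List.takeWhile, hc]
        · have h2 : ¬ '.' ∈ c :: rest := by simp [hm, hcs]
          simp [hm, h2]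

theorem pv_splitMax_dot (key : String) (h : '.' ∈ key.toList) :
    PySem.Str.splitMax? key "." 1 =
      some [String.ofList (key.toList.takeWhile (· ≠ '.')),
            String.ofList ((key.toList.dropWhile (· ≠ '.')).tail)] := by
  have hgo := pv_go_char key.toList (key.toList.length + 1) [] [] (by omega)
  have hsep : ".".toList = ['.'] := rfl
  unfold PySem.Str.splitMax? PySem.Chars.splitMax? PySem.Chars.splitOnMax
  rw [hsep]
  simp only [List.isEmpty_cons, Bool.false_eq_true, if_false,
    if_neg (by norm_num : ¬(1 : Int) < 0)]
  rw [show (1 : Int).toNat = 1 from rfl, hgo]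
  simp [h]

theorem pv_dot_decomp (cs : List Char) (h : '.' ∈ cs) :
    cs = cs.takeWhile (· ≠ '.') ++ '.' :: (cs.dropWhile (· ≠ '.')).tail := by
  induction cs with
  | nil => simp at h
  | cons c rest ih =>
    by_cases hc : c = '.'
    · subst hc; simp [List.takeWhile, List.dropWhile]
    · have hm : '.' ∈ rest := by
        rcases List.mem_cons.mp h with h1 | h1
        · exact absurd h1.symm hc
        · exact h1
      simpa [List.takeWhile, List.dropWhile, hc] using ih hm

theorem pv_isIn_dot (key : String) : PySem.Str.isIn "." key = true ↔ '.' ∈ key.toList := by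
  have hsep : ".".toList = ['.'] := rfl
  rw [PySem.Str.isIn_iff_infix, hsep]
  constructor
  · rintro ⟨s, t, hst⟩
    rw [← hst]; simp
  · intro hm
    obtain ⟨s, t, hst⟩ := List.append_of_mem hm
    exact ⟨s, t, by rw [hst]; simp⟩

theorem pvEnvKeys_list : (pvEnvKeys : List String) = ["memrl_retrieval.q_weight", "memrl_retrieval.min_similarity", "memrl_retrieval.min_q_value", "memrl_retrieval.confidence_threshold", "memrl_retrieval.semantic_k", "memrl_retrieval.prior_strength", "think_harder.min_expected_roi", "think_harder.token_budget_min", "think_harder.token_budget_max", "think_harder.cot_roi_threshold", "monitor.entropy_threshold", "monitor.repetition_threshold", "monitor.entropy_spike_threshold", "chat.try_cheap_first_quality_threshold", "escalation.max_retries", "escalation.max_escalations"] := by decide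

-- forward: a key of the flat env-key set passes A's split-and-lookup test
theorem pv_envKey_branch (key : String) (hk : PySem.Set.contains pvEnvKeys key = true) :
    PySem.Str.isIn "." key = true ∧
    ∃ sec par, PySem.Str.splitMax? key "." 1 = some [sec, par] ∧
      (pvEnvParams.contains sec && (pvEnvParams.getD sec PySem.Dict.empty).contains par) = true := by
  have hmem : key ∈ (pvEnvKeys : List String) := (PySem.Set.contains_iff pvEnvKeys key).mp hk
  rw [pvEnvKeys_list] at hmem
  simp only [List.mem_cons, List.not_mem_nil, or_false] at hmem
  rcases hmem with rfl | rfl | rfl | rfl | rfl | rfl | rfl | rfl | rfl | rfl | rfl | rfl | rfl | rfl | rfl | rfl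
  · exact ⟨by decide, "memrl_retrieval", "q_weight", by decide, by decide⟩
  · exact ⟨by decide, "memrl_retrieval", "min_similarity", by decide, by decide⟩
  · exact ⟨by decide, "memrl_retrieval", "min_q_value", by decide, by decide⟩
  · exact ⟨by decide, "memrl_retrieval", "confidence_threshold", by decide, by decide⟩
  · exact ⟨by decide, "memrl_retrieval", "semantic_k", by decide, by decide⟩
  · exact ⟨by decide, "memrl_retrieval", "prior_strength", by decide, by decide⟩
  · exact ⟨by decide, "think_harder", "min_expected_roi", by decide, by decide⟩
  · exact ⟨by decide, "think_harder", "token_budget_min", by decide, by decide⟩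
  · exact ⟨by decide, "think_harder", "token_budget_max", by decide, by decide⟩
  · exact ⟨by decide, "think_harder", "cot_roi_threshold", by decide, by decide⟩
  · exact ⟨by decide, "monitor", "entropy_threshold", by decide, by decide⟩
  · exact ⟨by decide, "monitor", "repetition_threshold", by decide, by decide⟩
  · exact ⟨by decide, "monitor", "entropy_spike_threshold", by decide, by decide⟩
  · exact ⟨by decide, "chat", "try_cheap_first_quality_threshold", by decide, by decide⟩
  · exact ⟨by decide, "escalation", "max_retries", by decide, by decide⟩
  · exact ⟨by decide, "escalation", "max_escalations", by decide, by decide⟩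

-- backward: a key passing A's split-and-lookup test is in the flat env-key set
theorem pv_envKey_complete (key : String) (hdot : '.' ∈ key.toList)
    (hc : (pvEnvParams.contains (String.ofList (key.toList.takeWhile (· ≠ '.'))) &&
      (pvEnvParams.getD (String.ofList (key.toList.takeWhile (· ≠ '.'))) PySem.Dict.empty).contains
        (String.ofList ((key.toList.dropWhile (· ≠ '.')).tail))) = true) :
    PySem.Set.contains pvEnvKeys key = true := by
  obtain ⟨h1, h2⟩ := Bool.and_eq_true_iff.mp hc
  have hdec := pv_dot_decomp key.toList hdot
  have hsec := (PySem.Dict.contains_iff_mem_keys pvEnvParams _).mp h1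
  rw [show pvEnvParams.keys = ["memrl_retrieval", "think_harder", "monitor", "chat", "escalation"] from by decide] at hsec
  simp only [List.mem_cons, List.not_mem_nil, or_false] at hsec
  rcases hsec with hs | hs | hs | hs | hs
  · rw [hs] at h2
    have htl : key.toList.takeWhile (· ≠ '.') = "memrl_retrieval".toList := by rw [← hs]; simp
    have hpm := (PySem.Dict.contains_iff_mem_keys (pvEnvParams.getD "memrl_retrieval" PySem.Dict.empty) _).mp h2
    rw [show (pvEnvParams.getD "memrl_retrieval" PySem.Dict.empty).keys = ["q_weight", "min_similarity", "min_q_value", "confidence_threshold", "semantic_k", "prior_strength"] from by decide] at hpm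
    simp only [List.mem_cons, List.not_mem_nil, or_false] at hpm
    rcases hpm with hp0 | hp1 | hp2 | hp3 | hp4 | hp5
    · have hdl : (key.toList.dropWhile (· ≠ '.')).tail = "q_weight".toList := by rw [← hp0]; simp
      have hkey : key = "memrl_retrieval.q_weight" := by
        rw [← String.toList_inj, hdec, htl, hdl]; decide
      rw [hkey]; decide
    · have hdl : (key.toList.dropWhile (· ≠ '.')).tail = "min_similarity".toList := by rw [← hp1]; simp
      have hkey : key = "memrl_retrieval.min_similarity" := by
        rw [← String.toList_inj, hdec, htl, hdl]; decide
      rw [hkey]; decide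
    · have hdl : (key.toList.dropWhile (· ≠ '.')).tail = "min_q_value".toList := by rw [← hp2]; simp
      have hkey : key = "memrl_retrieval.min_q_value" := by
        rw [← String.toList_inj, hdec, htl, hdl]; decide
      rw [hkey]; decide
    · have hdl : (key.toList.dropWhile (· ≠ '.')).tail = "confidence_threshold".toList := by rw [← hp3]; simp
      have hkey : key = "memrl_retrieval.confidence_threshold" := by
        rw [← String.toList_inj, hdec, htl, hdl]; decide
      rw [hkey]; decide
    · have hdl : (key.toList.dropWhile (· ≠ '.')).tail = "semantic_k".toList := by rw [← hp4]; simp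
      have hkey : key = "memrl_retrieval.semantic_k" := by
        rw [← String.toList_inj, hdec, htl, hdl]; decide
      rw [hkey]; decide
    · have hdl : (key.toList.dropWhile (· ≠ '.')).tail = "prior_strength".toList := by rw [← hp5]; simp
      have hkey : key = "memrl_retrieval.prior_strength" := by
        rw [← String.toList_inj, hdec, htl, hdl]; decide
      rw [hkey]; decide
  · rw [hs] at h2
    have htl : key.toList.takeWhile (· ≠ '.') = "think_harder".toList := by rw [← hs]; simp
    have hpm := (PySem.Dict.contains_iff_mem_keys (pvEnvParams.getD "think_harder" PySem.Dict.empty) _).mp h2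
    rw [show (pvEnvParams.getD "think_harder" PySem.Dict.empty).keys = ["min_expected_roi", "token_budget_min", "token_budget_max", "cot_roi_threshold"] from by decide] at hpm
    simp only [List.mem_cons, List.not_mem_nil, or_false] at hpm
    rcases hpm with hp0 | hp1 | hp2 | hp3
    · have hdl : (key.toList.dropWhile (· ≠ '.')).tail = "min_expected_roi".toList := by rw [← hp0]; simp
      have hkey : key = "think_harder.min_expected_roi" := by
        rw [← String.toList_inj, hdec, htl, hdl]; decide
      rw [hkey]; decide
    · have hdl : (key.toList.dropWhile (· ≠ '.')).tail = "token_budget_min".toList := by rw [← hp1]; simp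
      have hkey : key = "think_harder.token_budget_min" := by
        rw [← String.toList_inj, hdec, htl, hdl]; decide
      rw [hkey]; decide
    · have hdl : (key.toList.dropWhile (· ≠ '.')).tail = "token_budget_max".toList := by rw [← hp2]; simp
      have hkey : key = "think_harder.token_budget_max" := by
        rw [← String.toList_inj, hdec, htl, hdl]; decide
      rw [hkey]; decide
    · have hdl : (key.toList.dropWhile (· ≠ '.')).tail = "cot_roi_threshold".toList := by rw [← hp3]; simp
      have hkey : key = "think_harder.cot_roi_threshold" := by
        rw [← String.toList_inj, hdec, htl, hdl]; decide
      rw [hkey]; decide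
  · rw [hs] at h2
    have htl : key.toList.takeWhile (· ≠ '.') = "monitor".toList := by rw [← hs]; simp
    have hpm := (PySem.Dict.contains_iff_mem_keys (pvEnvParams.getD "monitor" PySem.Dict.empty) _).mp h2
    rw [show (pvEnvParams.getD "monitor" PySem.Dict.empty).keys = ["entropy_threshold", "repetition_threshold", "entropy_spike_threshold"] from by decide] at hpm
    simp only [List.mem_cons, List.not_mem_nil, or_false] at hpm
    rcases hpm with hp0 | hp1 | hp2
    · have hdl : (key.toList.dropWhile (· ≠ '.')).tail = "entropy_threshold".toList := by rw [← hp0]; simp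
      have hkey : key = "monitor.entropy_threshold" := by
        rw [← String.toList_inj, hdec, htl, hdl]; decide
      rw [hkey]; decide
    · have hdl : (key.toList.dropWhile (· ≠ '.')).tail = "repetition_threshold".toList := by rw [← hp1]; simp
      have hkey : key = "monitor.repetition_threshold" := by
        rw [← String.toList_inj, hdec, htl, hdl]; decide
      rw [hkey]; decide
    · have hdl : (key.toList.dropWhile (· ≠ '.')).tail = "entropy_spike_threshold".toList := by rw [← hp2]; simp
      have hkey : key = "monitor.entropy_spike_threshold" := by
        rw [← String.toList_inj, hdec, htl, hdl]; decide
      rw [hkey]; decide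
  · rw [hs] at h2
    have htl : key.toList.takeWhile (· ≠ '.') = "chat".toList := by rw [← hs]; simp
    have hpm := (PySem.Dict.contains_iff_mem_keys (pvEnvParams.getD "chat" PySem.Dict.empty) _).mp h2
    rw [show (pvEnvParams.getD "chat" PySem.Dict.empty).keys = ["try_cheap_first_quality_threshold"] from by decide] at hpm
    simp only [List.mem_cons, List.not_mem_nil, or_false] at hpm
    have hdl : (key.toList.dropWhile (· ≠ '.')).tail = "try_cheap_first_quality_threshold".toList := by
      rw [← hpm]; simp
    have hkey : key = "chat.try_cheap_first_quality_threshold" := by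
      rw [← String.toList_inj, hdec, htl, hdl]; decide
    rw [hkey]; decide
  · rw [hs] at h2
    have htl : key.toList.takeWhile (· ≠ '.') = "escalation".toList := by rw [← hs]; simp
    have hpm := (PySem.Dict.contains_iff_mem_keys (pvEnvParams.getD "escalation" PySem.Dict.empty) _).mp h2
    rw [show (pvEnvParams.getD "escalation" PySem.Dict.empty).keys = ["max_retries", "max_escalations"] from by decide] at hpm
    simp only [List.mem_cons, List.not_mem_nil, or_false] at hpm
    rcases hpm with hp0 | hp1
    · have hdl : (key.toList.dropWhile (· ≠ '.')).tail = "max_retries".toList := by rw [← hp0]; simp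
      have hkey : key = "escalation.max_retries" := by
        rw [← String.toList_inj, hdec, htl, hdl]; decide
      rw [hkey]; decide
    · have hdl : (key.toList.dropWhile (· ≠ '.')).tail = "max_escalations".toList := by rw [← hp1]; simp
      have hkey : key = "escalation.max_escalations" := by
        rw [← String.toList_inj, hdec, htl, hdl]; decide
      rw [hkey]; decide

-- one step of A's loop = one conditional insert into each of the three buckets
theorem pv_step_eq (h e u : PySem.Dict String String) (kv : String × String) :
    pvStepA (PySem.Dict.mk [("hot_swap", h), ("env_restart", e), ("unknown", u)]) kv =
      PySem.Dict.mk [("hot_swap", pvCond "hot_swap" h kv),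
        ("env_restart", pvCond "env_restart" e kv), ("unknown", pvCond "unknown" u kv)] := by
  unfold pvStepA pvCond pvBucketOf
  by_cases hh : PySem.Set.contains pvHotSwap kv.1 = true
  · simp only [hh, if_true]; rfl
  · simp only [hh, Bool.false_eq_true, if_false]
    by_cases hk : PySem.Set.contains pvEnvKeys kv.1 = true
    · obtain ⟨h1, sec, par, h2, h3⟩ := pv_envKey_branch kv.1 hk
      simp only [hk, if_true, h1, h2, h3]; rfl
    · simp only [hk, Bool.false_eq_true, if_false]
      by_cases hd : PySem.Str.isIn "." kv.1 = true
      · have hdot := (pv_isIn_dot kv.1).mp hd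
        rw [if_pos hd, pv_splitMax_dot kv.1 hdot]
        have hcf : (pvEnvParams.contains (String.ofList (kv.1.toList.takeWhile (· ≠ '.'))) &&
            (pvEnvParams.getD (String.ofList (kv.1.toList.takeWhile (· ≠ '.'))) PySem.Dict.empty).contains
              (String.ofList ((kv.1.toList.dropWhile (· ≠ '.')).tail))) = false := by
          cases hEq : (pvEnvParams.contains (String.ofList (kv.1.toList.takeWhile (· ≠ '.'))) &&
            (pvEnvParams.getD (String.ofList (kv.1.toList.takeWhile (· ≠ '.'))) PySem.Dict.empty).contains
              (String.ofList ((kv.1.toList.dropWhile (· ≠ '.')).tail))) with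
          | false => rfl
          | true => exact absurd (pv_envKey_complete kv.1 hdot hEq) hk
        simp only [hcf, Bool.false_eq_true, if_false]; rfl
      · rw [if_neg hd]; rfl

-- A's whole fold splits into the three independent conditional folds
theorem pv_fold_eq : ∀ (params : List (String × String)) (h e u : PySem.Dict String String),
    params.foldl pvStepA (PySem.Dict.mk [("hot_swap", h), ("env_restart", e), ("unknown", u)]) =
      PySem.Dict.mk [("hot_swap", params.foldl (pvCond "hot_swap") h),
        ("env_restart", params.foldl (pvCond "env_restart") e),
        ("unknown", params.foldl (pvCond "unknown") u)] := by
  intro params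
  induction params with
  | nil => intro h e u; rfl
  | cons kv rest ih =>
    intro h e u
    rw [List.foldl_cons, List.foldl_cons, List.foldl_cons, List.foldl_cons, pv_step_eq,
      ih (pvCond "hot_swap" h kv) (pvCond "env_restart" e kv) (pvCond "unknown" u kv)]

-- ===== VERDICT (by name: the statement is the Claim_ definition above) =====
theorem classify_params_spec : Claim_equal_classify_params := by
  intro params _
  unfold Spec_classify_params classify_params classify_params_alt
  simp only []
  rw [show (PySem.Dict.ofList [("hot_swap", PySem.Dict.empty), ("env_restart", PySem.Dict.empty),
      ("unknown", PySem.Dict.empty)] : PySem.Dict String (PySem.Dict String String)) =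
    PySem.Dict.mk [("hot_swap", PySem.Dict.empty), ("env_restart", PySem.Dict.empty),
      ("unknown", PySem.Dict.empty)] from rfl, pv_fold_eq]
  simp only [pvBuckets, List.map_cons, List.map_nil, List.foldl_filter]
  rfl
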